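-- pv_equiv track=rewrite | github.com/YuvrajSonavane-aka-Fudo/BluePineapple | 18/12/25/No39.py | possibility
-- ===== SOURCE A (Python) =====
-- from collections import defaultdict
--
-- def possibility(str1):
--     dict1 = defaultdict(int)
--     for i in str1:
--         dict1[i] += 1
--
--     maxDictValue = max(dict1.values())
--     maxDictKey = max(dict1 , key = dict1.get)
--     remainingCount = abs(maxDictValue - sum(dict1.values()))
--
--     if remainingCount - maxDictValue >= 1:
--         return True
--     else:
--         return False
-- ===== SOURCE B (Python) =====
-- def possibility(str1):
--     # strip-and-recurse: take the first character, drop all its occurrences,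
--     # its count is the length difference; the max count is the max of that
--     # and the max count of what is left.  No dict, no sorting.
--     def max_count(s):
--         c = s[0]
--         rest = [x for x in s if x != c]
--         k = len(s) - len(rest)
--         return k if not rest else max(k, max_count(rest))
--     return len(str1) - 2 * max_count(list(str1)) >= 1
-- ===== Notes on version B (the rewrite author's own statement) =====
-- stated objective: alternative
-- what changed: B replaces A's frequency-dict build plus max-over-values with a partition recursion: it repeatedly takes the first remaining character, filters out all of its occurrences (its count is the length drop), and recurses on the rest, taking the max count along the way; then returns len(str1) - 2*max >= 1.
import Mathlib
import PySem

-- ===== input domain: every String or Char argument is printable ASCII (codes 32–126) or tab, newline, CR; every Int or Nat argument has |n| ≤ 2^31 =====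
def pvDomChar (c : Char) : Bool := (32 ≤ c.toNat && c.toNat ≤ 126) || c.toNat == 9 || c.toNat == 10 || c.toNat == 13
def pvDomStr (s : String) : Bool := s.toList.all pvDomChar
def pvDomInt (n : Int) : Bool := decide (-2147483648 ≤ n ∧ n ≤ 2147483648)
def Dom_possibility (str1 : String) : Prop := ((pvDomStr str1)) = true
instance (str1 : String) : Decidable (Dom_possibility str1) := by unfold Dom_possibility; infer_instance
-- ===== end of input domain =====

-- B replaces A's frequency dict with a partition recursion: strip all occurrences of the
-- first character (its count = length drop), recurse on the rest, keep the max count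
-- ('alternative' objective; same return value on every nonempty string).

-- ===== PORT A =====
def possibility (str1 : String) : Bool :=
  -- dict1 = defaultdict(int); for i in str1: dict1[i] += 1
  let dict1 := str1.toList.foldl (fun d i => d.modify i 0 (· + 1)) (PySem.Dict.empty : PySem.Dict Char Int)
  -- maxDictValue = max(dict1.values())  (ValueError on empty dict: excluded by Pre_)
  let maxDictValue := (PySem.List.max? dict1.values (fun v => v)).getD 0
  -- maxDictKey = max(dict1, key=dict1.get)  (computed by A but never used)
  let _maxDictKey := PySem.List.max? dict1.keys (fun k => dict1.getD k 0)
  -- remainingCount = abs(maxDictValue - sum(dict1.values()))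
  let remainingCount := |maxDictValue - dict1.values.sum|
  if remainingCount - maxDictValue ≥ 1 then true else false

-- ===== PORT B =====
-- max_count(s): c = s[0] (IndexError on []: excluded by Pre_, recursion never reaches []);
-- rest = [x for x in s if x != c]; k = len(s) - len(rest);
-- return k if not rest else max(k, max_count(rest))
def pvMaxCount : List Char → Int
  | [] => 0   -- Python raises IndexError here; Pre_ excludes "", and recursion never reaches []
  | c :: t =>
    let s := c :: t
    let rest := s.filter (fun x => x ≠ c)
    let k := (s.length : Int) - rest.length
    if rest.isEmpty then k else max k (pvMaxCount rest)
termination_by s => s.length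
decreasing_by
  exact List.length_filter_lt_length_iff_exists.mpr ⟨c, by simp, by simp⟩

def possibility_alt (str1 : String) : Bool :=
  decide ((str1.toList.length : Int) - 2 * pvMaxCount str1.toList ≥ 1)

-- ===== PRECONDITION & SPEC =====
-- A raises ValueError on the empty string (max() of an empty sequence); B raises IndexError (s[0]).
def Pre_possibility (str1 : String) : Prop := str1 ≠ ""
instance (str1 : String) : Decidable (Pre_possibility str1) := by unfold Pre_possibility; infer_instance
def pvWitness_possibility : String := "aab"

def Spec_possibility (str1 : String) (out : Bool) : Prop := out = possibility_alt str1
instance (str1 : String) (out : Bool) : Decidable (Spec_possibility str1 out) := by unfold Spec_possibility; infer_instance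

-- ===== CLAIM (what is proved, stated in full; the proofs are below) =====
def Claim_equal_possibility : Prop := ∀ (str1 : String), Dom_possibility str1 → Pre_possibility str1 → Spec_possibility str1 (possibility str1)

-- ===== LEMMAS AND PROOFS =====

-- the distinct characters of cs, as PySem.Set.ofList, are a permutation of Mathlib's cs.dedup
theorem pv_ofList_perm_dedup (cs : List Char) :
    (PySem.Set.ofList cs : List Char).Perm cs.dedup := by
  refine List.perm_of_nodup_nodup_toFinset_eq (PySem.Set.nodup_ofList cs) cs.nodup_dedup ?_
  ext c
  simp [PySem.Set.mem_ofList]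

-- summing the counts of the distinct characters gives the length
theorem pv_sum_counts (cs : List Char) :
    ((PySem.Set.ofList cs : List Char).map (fun k => (cs.count k : Int))).sum = (cs.length : Int) := by
  have hperm := ((pv_ofList_perm_dedup cs).map (fun k => (cs.count k : Int))).sum_eq
  rw [hperm, ← List.sum_map_count_dedup_eq_length cs, Nat.cast_list_sum, List.map_map]
  rfl

-- A's dict values are the counts of the distinct characters
theorem pv_values_counter (cs : List Char) :
    (PySem.Dict.counter cs).values = (PySem.Set.ofList cs : List Char).map (fun k => (cs.count k : Int)) := by
  show (PySem.Dict.counter cs).items.map (·.2) = _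
  rw [PySem.Dict.items_counter, List.map_map]
  rfl

-- B's recursion computes the maximum character count: it is an upper bound on every
-- count and is itself the count of some character of the list
theorem pv_maxCount_spec (cs : List Char) (hne : cs ≠ []) :
    (∀ x ∈ cs, (cs.count x : Int) ≤ pvMaxCount cs) ∧ (∃ x ∈ cs, pvMaxCount cs = cs.count x) := by
  induction hlen : cs.length using Nat.strong_induction_on generalizing cs with
  | _ n ih =>
  match cs, hne with
  | c :: t, _ =>
  rw [pvMaxCount.eq_def]
  simp only
  set s := c :: t with hs
  set rest := s.filter (fun x => x ≠ c) with hrest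
  have hc0 : rest.count c = 0 := by
    refine List.count_eq_zero.mpr ?_
    intro h
    simpa using (List.mem_filter.mp h).2
  have hcx : ∀ x, x ≠ c → rest.count x = s.count x := by
    intro x hxc
    rw [hrest, List.count_filter]
    simp [hxc]
  have hk : (s.length : Int) - rest.length = s.count c := by
    have hsplit : s.length = (s.filter (fun x => x = c)).length + rest.length := by
      simpa [hrest] using List.length_eq_length_filter_add (l := s) (fun x => x = c)
    have hcnt : s.count c = (s.filter (fun x => x = c)).length := by
      rw [List.count_eq_length_filter]
      congr 1
    omega
  by_cases hre : rest.isEmpty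
  · -- every element of s equals c
    have hall : ∀ x ∈ s, x = c := by
      intro x hx
      by_contra hxc
      have : x ∈ rest := List.mem_filter.mpr ⟨hx, by simp [hxc]⟩
      simp [List.isEmpty_iff.mp hre] at this
    simp only [hre, if_true, hk]
    constructor
    · intro x hx; rw [hall x hx]
    · exact ⟨c, by simp [hs], rfl⟩
  · have hreF : rest.isEmpty = false := by simpa using hre
    have hrne : rest ≠ [] := by simpa [List.isEmpty_iff] using hre
    have hrlt : rest.length < s.length :=
      List.length_filter_lt_length_iff_exists.mpr ⟨c, by simp [hs], by simp⟩
    obtain ⟨hub, x0, hx0mem, hx0⟩ := ih rest.length (by omega) rest hrne rfl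
    simp only [hreF, Bool.false_eq_true, if_false, hk]
    have hx0c : x0 ≠ c := by
      intro h
      rw [h] at hx0mem
      have hpos : 0 < rest.count c := List.count_pos_iff.mpr hx0mem
      omega
    have hx0s : x0 ∈ s := (List.mem_filter.mp hx0mem).1
    have hcx0 : rest.count x0 = s.count x0 := hcx x0 hx0c
    constructor
    · intro x hx
      by_cases hxc : x = c
      · subst hxc; exact le_max_of_le_left le_rfl
      · have hxr : x ∈ rest := List.mem_filter.mpr ⟨hx, by simp [hxc]⟩
        have := hub x hxr
        rw [hcx x hxc] at this
        exact le_max_of_le_right this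
    · rcases max_cases ((s.count c : Int)) (pvMaxCount rest) with ⟨heq, _⟩ | ⟨heq, _⟩
      · exact ⟨c, by simp [hs], heq⟩
      · exact ⟨x0, hx0s, by rw [heq, hx0, hcx0]⟩

-- A's max-over-dict-values equals B's recursive max count (nonempty list)
theorem pv_max_eq (cs : List Char) (hne : cs ≠ []) :
    (PySem.List.max? ((PySem.Set.ofList cs : List Char).map (fun c => (cs.count c : Int))) (fun v => v)).getD 0
      = pvMaxCount cs := by
  set V := (PySem.Set.ofList cs : List Char).map (fun k => (cs.count k : Int)) with hV
  have hVne : V ≠ [] := by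
    simp only [hV, ne_eq, List.map_eq_nil_iff]
    intro h
    rcases List.exists_mem_of_ne_nil cs hne with ⟨x, hx⟩
    exact (List.eq_nil_iff_forall_not_mem.mp h x) ((PySem.Set.mem_ofList cs x).mpr hx)
  have hVn : PySem.List.max? V (fun v => v) ≠ none := by
    simp [PySem.List.max?_eq_none_iff, hVne]
  rcases Option.ne_none_iff_exists'.mp hVn with ⟨m, hm⟩
  rw [hm, Option.getD_some]
  obtain ⟨hub, x0, hx0mem, hx0⟩ := pv_maxCount_spec cs hne
  -- m is the count of some distinct character, so m ≤ pvMaxCount cs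
  rcases List.mem_map.mp (PySem.List.max?_mem hm) with ⟨c, hcmem, hcnt⟩
  have hcs : c ∈ cs := (PySem.Set.mem_ofList cs c).mp hcmem
  have h1 : m ≤ pvMaxCount cs := by rw [← hcnt]; exact hub c hcs
  -- pvMaxCount cs is the count of some character, which appears in V, so ≤ m
  have hx0V : ((cs.count x0 : Int)) ∈ V := by
    rw [hV]
    exact List.mem_map.mpr ⟨x0, (PySem.Set.mem_ofList cs x0).mpr hx0mem, rfl⟩
  have h2 : pvMaxCount cs ≤ m := by
    rw [hx0]
    exact PySem.List.max?_isMax hm _ hx0V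
  omega

-- the two ports agree on a nonempty character list, every let of A substituted
theorem pv_main (cs : List Char) (hne : cs ≠ []) :
    (if |((PySem.List.max? (cs.foldl (fun d i => d.modify i 0 (· + 1)) (PySem.Dict.empty : PySem.Dict Char Int)).values (fun v => v)).getD 0)
        - (cs.foldl (fun d i => d.modify i 0 (· + 1)) (PySem.Dict.empty : PySem.Dict Char Int)).values.sum|
        - ((PySem.List.max? (cs.foldl (fun d i => d.modify i 0 (· + 1)) (PySem.Dict.empty : PySem.Dict Char Int)).values (fun v => v)).getD 0) ≥ 1
     then true else false)
    = decide ((cs.length : Int) - 2 * pvMaxCount cs ≥ 1) := by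
  rw [← PySem.Dict.counter_eq_foldl, pv_values_counter]
  set V := (PySem.Set.ofList cs : List Char).map (fun k => (cs.count k : Int)) with hV
  have hsum : V.sum = (cs.length : Int) := by rw [hV]; exact pv_sum_counts cs
  have hmax : (PySem.List.max? V (fun v => v)).getD 0 = pvMaxCount cs := pv_max_eq cs hne
  rw [hsum, hmax]
  obtain ⟨hub, x0, hx0mem, hx0⟩ := pv_maxCount_spec cs hne
  have hm0 : 0 ≤ pvMaxCount cs := by rw [hx0]; exact Int.natCast_nonneg _
  have hmlen : pvMaxCount cs ≤ (cs.length : Int) := by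
    rw [hx0]; exact_mod_cast List.count_le_length
  set m := pvMaxCount cs
  have habs : |m - (cs.length : Int)| = (cs.length : Int) - m := by
    rw [abs_sub_comm]; exact abs_of_nonneg (by omega)
  rw [habs]
  by_cases h : (cs.length : Int) - m - m ≥ 1
  · simp [h, (by omega : (cs.length : Int) - 2 * m ≥ 1)]
  · simp only [if_neg h]
    have : ¬ ((cs.length : Int) - 2 * m ≥ 1) := by omega
    simp [this]

-- ===== VERDICT (by name: the statement is the Claim_ definition above) =====
theorem possibility_spec : Claim_equal_possibility := by
  intro str1 _ hpre
  have hne : str1.toList ≠ [] := by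
    intro h
    exact hpre (by simpa [String.toList_eq_nil_iff] using h)
  exact pv_main str1.toList hne
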